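-- pv_equiv track=rewrite | github.com/dbabiak/aoc-2019 | src/d03.py | level_set
-- ===== SOURCE A (Python) =====
-- from typing import Tuple, Iterable, Dict, NewType
--
-- Point = NewType('Point', Tuple[int,int])
--
-- def level_set(i: int) -> Iterable[Point]:
--     assert i >= 0
--
--     if i == 0:
--         yield (0,0)
--
--     else:
--         x, y = (-i, 0)
--
--         while y < i:
--             x += 1
--             y += 1
--             yield (x, y)
--
--         while x < i:
--             x += 1
--             y -= 1
--             yield (x, y)
--
--         while y > -i:
--             x -= 1
--             y -= 1
--             yield (x, y)
--
--         while x > -i: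
--             x -= 1
--             y += 1
--             yield (x, y)
-- ===== SOURCE B (Python) =====
-- def level_set(i):
--     assert i >= 0
--     if i == 0:
--         yield (0, 0)
--         return
--     # compute only the NE edge; the other three edges are its successive
--     # 90-degree clockwise rotations (x, y) -> (y, -x)
--     edge = [(k - i, k) for k in range(1, i + 1)]
--     for _ in range(4):
--         yield from edge
--         edge = [(y, -x) for (x, y) in edge]
-- ===== Notes on version B (the rewrite author's own statement) =====
-- stated objective: alternative
-- what changed: B computes only the first diamond edge and derives the other three by repeatedly rotating the point list 90 degrees clockwise ((x,y)->(y,-x)), exploiting the diamond's 4-fold symmetry, instead of A's four stateful while-loops walking each edge with a running cursor.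
import Mathlib
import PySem

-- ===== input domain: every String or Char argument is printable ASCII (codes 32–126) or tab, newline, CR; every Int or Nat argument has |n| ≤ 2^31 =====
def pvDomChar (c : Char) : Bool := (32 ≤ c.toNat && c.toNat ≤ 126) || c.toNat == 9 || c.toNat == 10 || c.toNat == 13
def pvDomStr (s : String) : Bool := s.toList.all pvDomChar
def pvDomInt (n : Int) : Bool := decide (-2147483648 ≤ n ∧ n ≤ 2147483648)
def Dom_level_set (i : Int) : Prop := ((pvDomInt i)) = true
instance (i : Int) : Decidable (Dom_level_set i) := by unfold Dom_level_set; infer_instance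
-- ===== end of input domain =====

-- B computes only the first diamond edge and derives the other three by repeated 90-degree clockwise rotation of the point list (symmetry-based decomposition, same cost).
-- A's generator raises AssertionError for i < 0; Pre_ excludes exactly those inputs.


-- ===== PORT A =====
-- while y < i: x += 1; y += 1; yield (x, y)   — returns (yielded points, final x, final y)
def lsLoop1 (i x y : Int) : List (Int × Int) × Int × Int :=
  if y < i then
    let r := lsLoop1 i (x + 1) (y + 1)
    ((x + 1, y + 1) :: r.1, r.2)
  else ([], x, y)
termination_by (i - y).toNat
decreasing_by omega

-- while x < i: x += 1; y -= 1; yield (x, y)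
def lsLoop2 (i x y : Int) : List (Int × Int) × Int × Int :=
  if x < i then
    let r := lsLoop2 i (x + 1) (y - 1)
    ((x + 1, y - 1) :: r.1, r.2)
  else ([], x, y)
termination_by (i - x).toNat
decreasing_by omega

-- while y > -i: x -= 1; y -= 1; yield (x, y)
def lsLoop3 (i x y : Int) : List (Int × Int) × Int × Int :=
  if y > -i then
    let r := lsLoop3 i (x - 1) (y - 1)
    ((x - 1, y - 1) :: r.1, r.2)
  else ([], x, y)
termination_by (y + i).toNat
decreasing_by omega

-- while x > -i: x -= 1; y += 1; yield (x, y)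
def lsLoop4 (i x y : Int) : List (Int × Int) × Int × Int :=
  if x > -i then
    let r := lsLoop4 i (x - 1) (y + 1)
    ((x - 1, y + 1) :: r.1, r.2)
  else ([], x, y)
termination_by (x + i).toNat
decreasing_by omega

def level_set (i : Int) : List (Int × Int) :=
  if i == 0 then [(0, 0)]
  else
    let s1 := lsLoop1 i (-i) 0
    let s2 := lsLoop2 i s1.2.1 s1.2.2
    let s3 := lsLoop3 i s2.2.1 s2.2.2
    let s4 := lsLoop4 i s3.2.1 s3.2.2
    s1.1 ++ s2.1 ++ s3.1 ++ s4.1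

-- ===== PORT B =====
-- for _ in range(4): yield from edge; edge = [(y, -x) for (x, y) in edge]
def lsRotLoop : Nat → List (Int × Int) → List (Int × Int) → List (Int × Int)
  | 0, _, acc => acc
  | n + 1, edge, acc => lsRotLoop n (edge.map fun p => (p.2, -p.1)) (acc ++ edge)

def level_set_alt (i : Int) : List (Int × Int) :=
  if i == 0 then [(0, 0)]
  else
    let edge := (PySem.List.pyRange 1 (i + 1) 1).map (fun k => (k - i, k))
    lsRotLoop 4 edge []

-- ===== PRECONDITION & SPEC =====
-- A asserts i >= 0 and raises AssertionError otherwise; Pre_ excludes exactly those inputs.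
def Pre_level_set (i : Int) : Prop := 0 ≤ i
instance (i : Int) : Decidable (Pre_level_set i) := by unfold Pre_level_set; infer_instance
def pvWitness_level_set : Int := 2

def Spec_level_set (i : Int) (out : List (Int × Int)) : Prop := out = level_set_alt i
instance (i : Int) (out : List (Int × Int)) : Decidable (Spec_level_set i out) := by unfold Spec_level_set; infer_instance

-- ===== CLAIM =====
def Claim_equal_level_set : Prop := ∀ (i : Int), Dom_level_set i → Pre_level_set i → Spec_level_set i (level_set i)

-- ===== LEMMAS AND PROOFS =====
theorem lsLoop1_eq (n : Nat) : ∀ (i x y : Int), i - y = n →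
    lsLoop1 i x y = ((List.range n).map (fun (j : Nat) => ((x + 1 + (j:Int), y + 1 + (j:Int)) : Int × Int)), x + n, y + n) := by
  induction n with
  | zero => intro i x y h; rw [lsLoop1]; simp; omega
  | succ n ih =>
    intro i x y h
    rw [lsLoop1]
    have hy : y < i := by omega
    rw [if_pos hy, ih i (x + 1) (y + 1) (by omega)]
    rw [List.range_succ_eq_map, List.map_cons, List.map_map]
    refine Prod.ext ?_ (Prod.ext (by push_cast; ring) (by push_cast; ring))
    refine List.cons_eq_cons.mpr ⟨by norm_num, List.map_congr_left fun j _ => by simp [Function.comp]; constructor <;> ring⟩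

theorem lsLoop2_eq (n : Nat) : ∀ (i x y : Int), i - x = n →
    lsLoop2 i x y = ((List.range n).map (fun (j : Nat) => ((x + 1 + (j:Int), y - 1 - (j:Int)) : Int × Int)), x + n, y - n) := by
  induction n with
  | zero => intro i x y h; rw [lsLoop2]; simp; omega
  | succ n ih =>
    intro i x y h
    rw [lsLoop2]
    have hx : x < i := by omega
    rw [if_pos hx, ih i (x + 1) (y - 1) (by omega)]
    rw [List.range_succ_eq_map, List.map_cons, List.map_map]
    refine Prod.ext ?_ (Prod.ext (by push_cast; ring) (by push_cast; ring))
    refine List.cons_eq_cons.mpr ⟨by norm_num, List.map_congr_left fun j _ => by simp [Function.comp]; constructor <;> ring⟩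

theorem lsLoop3_eq (n : Nat) : ∀ (i x y : Int), y + i = n →
    lsLoop3 i x y = ((List.range n).map (fun (j : Nat) => ((x - 1 - (j:Int), y - 1 - (j:Int)) : Int × Int)), x - n, y - n) := by
  induction n with
  | zero => intro i x y h; rw [lsLoop3]; simp; omega
  | succ n ih =>
    intro i x y h
    rw [lsLoop3]
    have hy : y > -i := by omega
    rw [if_pos hy, ih i (x - 1) (y - 1) (by omega)]
    rw [List.range_succ_eq_map, List.map_cons, List.map_map]
    refine Prod.ext ?_ (Prod.ext (by push_cast; ring) (by push_cast; ring))
    refine List.cons_eq_cons.mpr ⟨by norm_num, List.map_congr_left fun j _ => by simp [Function.comp]; constructor <;> ring⟩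

theorem lsLoop4_eq (n : Nat) : ∀ (i x y : Int), x + i = n →
    lsLoop4 i x y = ((List.range n).map (fun (j : Nat) => ((x - 1 - (j:Int), y + 1 + (j:Int)) : Int × Int)), x - n, y + n) := by
  induction n with
  | zero => intro i x y h; rw [lsLoop4]; simp; omega
  | succ n ih =>
    intro i x y h
    rw [lsLoop4]
    have hx : x > -i := by omega
    rw [if_pos hx, ih i (x - 1) (y + 1) (by omega)]
    rw [List.range_succ_eq_map, List.map_cons, List.map_map]
    refine Prod.ext ?_ (Prod.ext (by push_cast; ring) (by push_cast; ring))
    refine List.cons_eq_cons.mpr ⟨by norm_num, List.map_congr_left fun j _ => by simp [Function.comp]; constructor <;> ring⟩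

-- unrolling B's four-iteration rotation loop
theorem lsRotLoop_four (e : List (Int × Int)) :
    lsRotLoop 4 e [] =
      e ++ e.map (fun p => (p.2, -p.1))
        ++ (e.map (fun p => (p.2, -p.1))).map (fun p => (p.2, -p.1))
        ++ ((e.map (fun p => (p.2, -p.1))).map (fun p => (p.2, -p.1))).map (fun p => (p.2, -p.1)) := by
  simp [lsRotLoop]

-- ===== VERDICT =====
theorem level_set_spec : Claim_equal_level_set := by
  intro i _ hpre
  unfold Pre_level_set at hpre
  unfold Spec_level_set level_set level_set_alt
  by_cases h0 : i = 0
  · simp [h0]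
  · have hne : (i == 0) = false := by simp [h0]
    rw [hne]
    simp only [Bool.false_eq_true, if_false]
    set n : Nat := i.toNat with hn
    rw [lsLoop1_eq n i (-i) 0 (by omega)]
    rw [lsLoop2_eq n i (-i + n) (0 + n) (by omega)]
    rw [lsLoop3_eq n i ((-i + n) + n) ((0 + n) - n) (by omega)]
    rw [lsLoop4_eq n i (((-i + n) + n) - n) (((0 + n) - n) - n) (by omega)]
    rw [lsRotLoop_four]
    rw [PySem.List.pyRange_one 1 (i + 1)]
    have ht : (i + 1 - 1).toNat = n := by omega
    rw [ht]
    simp only [List.map_map]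
    have hni : (n : Int) = i := by omega
    have e1 : (List.range n).map (fun (j : Nat) => ((-i + 1 + (j:Int), 0 + 1 + (j:Int)) : Int × Int))
        = (List.range n).map ((fun k => (k - i, k)) ∘ fun (k : Nat) => 1 + (k:Int)) :=
      List.map_congr_left fun j _ => by simp [Function.comp, Prod.ext_iff]; omega
    have e2 : (List.range n).map (fun (j : Nat) => (((-i + n) + 1 + (j:Int), (0 + n) - 1 - (j:Int)) : Int × Int))
        = (List.range n).map ((fun (p : Int × Int) => (p.2, -p.1)) ∘ ((fun k => (k - i, k)) ∘ fun (k : Nat) => 1 + (k:Int))) :=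
      List.map_congr_left fun j _ => by simp [Function.comp, hni, Prod.ext_iff]; omega
    have e3 : (List.range n).map (fun (j : Nat) => ((((-i + n) + n) - 1 - (j:Int), ((0 + n) - n) - 1 - (j:Int)) : Int × Int))
        = (List.range n).map ((fun (p : Int × Int) => (p.2, -p.1)) ∘ ((fun (p : Int × Int) => (p.2, -p.1)) ∘ ((fun k => (k - i, k)) ∘ fun (k : Nat) => 1 + (k:Int)))) :=
      List.map_congr_left fun j _ => by simp [Function.comp, hni, Prod.ext_iff]; omega
    have e4 : (List.range n).map (fun (j : Nat) => (((((-i + n) + n) - n) - 1 - (j:Int), (((0 + n) - n) - n) + 1 + (j:Int)) : Int × Int))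
        = (List.range n).map ((fun (p : Int × Int) => (p.2, -p.1)) ∘ ((fun (p : Int × Int) => (p.2, -p.1)) ∘ ((fun (p : Int × Int) => (p.2, -p.1)) ∘ ((fun k => (k - i, k)) ∘ fun (k : Nat) => 1 + (k:Int))))) :=
      List.map_congr_left fun j _ => by simp [Function.comp, hni, Prod.ext_iff]; omega
    rw [e1, e2, e3, e4]
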